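/- GENERATED by mk_final_copies.py from the proof of the farm's unit `start_decoder.R6` (farm:start_decoder.R6.2: Proof.lean) as the
   re-elaboration sweep compiled it — do not edit. -/
import Asan.CheckWalk
import Vorbis.Spec.Units.start_decoder_R6
import Vorbis.Spec.Worked.start_decoder_R6_Lemmas

/-!
# `start_decoder.R6` (0x115cf9 – 0x115db4, stb_vorbis_fixed.c 4076 – 4079)

`r->classdata = setup_malloc(f, 8·E)`, the NULL test (`error(f, VORBIS_outofmem)` → the epilogue 0x113b22), `memset` of the new
block, `j = 0`, the spill of `i`. The work is in Lemmas.lean, one lemma per returned callee state / exit assertion: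

* `to_malloc_return`   0x115cf9 … 0x115d40 (return of `setup_malloc`): three check sites, `ArenaPre`;
* `from_malloc_return` 0x115d40 … both exits: four more check sites, the preconditions of `error` and `memset`;
* `exit_R7`            the exit assertion `AtR7` at 0x115db9 (the grown ghost arena);
* `exit_ERR`           the exit assertion `AtERR` at 0x113b22 (`Frame.same` through the failure clause of `setup_malloc.spec`);
* `seg_R6`             their composition.
-/

namespace Vorbis.Spec.start_decoder_R6
end Vorbis.Spec.start_decoder_R6

/-- Segment R6 of `start_decoder` takes its entry assertion `AtR6` to `AtR7` (0x115db9) or `AtERR` (0x113b22). -/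
theorem Vorbis.Spec.Worked.start_decoder_R6_ok : Vorbis.Spec.start_decoder_R6.Statement := by
  unfold Vorbis.Spec.start_decoder_R6.Statement
  intro Lay hLay μ hμ u₀ hcode hload8 hload1 hload4 hsm hstore8 herr hmemset
  exact Vorbis.Spec.start_decoder_R6.seg_R6 Lay hLay μ hμ u₀ hcode hload8 hload1 hload4 hsm hstore8 herr hmemset
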